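-- pv_equiv track=rewrite | github.com/Nadav-Elami/adaptive-syntax-filter | src/adaptive_syntax_filter/data/alphabet_manager.py | _detect_naming_pattern
-- ===== SOURCE A (Python) =====
-- from typing import List, Dict, Optional, Tuple, Union
--
-- def _detect_naming_pattern(phrase_symbols: List[str]) -> str:
--     """Detect naming pattern in phrase symbols."""
--     if not phrase_symbols:
--         return 'empty'
--
--     # Check for letter pattern
--     if all(len(s) == 1 and s.islower() and s.isalpha() for s in phrase_symbols):
--         return 'single_letters'
--
--     # Check for numbered pattern
--     if all(s.startswith('p') and s[1:].isdigit() for s in phrase_symbols):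
--         return 'numbered'
--
--     # Check for double letter pattern
--     if all(len(s) == 2 and s.islower() and s.isalpha() for s in phrase_symbols):
--         return 'double_letters'
--
--     return 'custom'
-- ===== SOURCE B (Python) =====
-- def _detect_naming_pattern(phrase_symbols):
--     """Detect naming pattern by filtering a priority-ordered candidate list."""
--     if not phrase_symbols:
--         return 'empty'
--
--     def _matches(pattern, s):
--         if pattern == 'single_letters':
--             return len(s) == 1 and s.islower() and s.isalpha()
--         if pattern == 'numbered':
--             return s.startswith('p') and s[1:].isdigit()
--         return len(s) == 2 and s.islower() and s.isalpha()
--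
--     candidates = ['single_letters', 'numbered', 'double_letters']
--     for s in phrase_symbols:
--         candidates = [p for p in candidates if _matches(p, s)]
--         if not candidates:
--             return 'custom'
--     return candidates[0]
-- ===== Notes on version B (the rewrite author's own statement) =====
-- stated objective: alternative
-- what changed: Instead of A's three separate all() passes tried in priority order, B makes one pass over the symbols while filtering a priority-ordered list of surviving candidate patterns, returning 'custom' as soon as it empties and otherwise the first survivor.
import Mathlib
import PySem

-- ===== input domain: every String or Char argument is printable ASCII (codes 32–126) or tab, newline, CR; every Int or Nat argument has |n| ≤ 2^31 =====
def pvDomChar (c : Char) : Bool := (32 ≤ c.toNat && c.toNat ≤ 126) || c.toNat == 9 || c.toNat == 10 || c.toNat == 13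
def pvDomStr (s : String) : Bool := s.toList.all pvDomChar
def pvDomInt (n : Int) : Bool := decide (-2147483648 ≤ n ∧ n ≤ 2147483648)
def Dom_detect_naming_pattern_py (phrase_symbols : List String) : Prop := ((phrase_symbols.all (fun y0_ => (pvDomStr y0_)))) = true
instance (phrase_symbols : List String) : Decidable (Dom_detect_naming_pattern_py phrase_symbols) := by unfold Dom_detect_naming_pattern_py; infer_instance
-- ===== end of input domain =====

-- B filters a priority-ordered candidate-pattern list in one pass instead of A's three
-- separate all() passes (alternative decomposition, same cost).


-- ===== PORT A =====
-- s.islower(): hand port (no PySem string-level islower); exact on the ASCII domain,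
-- where the cased characters are exactly the letters: at least one cased character
-- and no uppercase character.
def pyStrIslower (s : String) : Bool :=
  s.toList.any (fun c => PySem.Chars.islower c || PySem.Chars.isupper c) &&
  s.toList.all (fun c => !PySem.Chars.isupper c)

-- len(s) == 1 and s.islower() and s.isalpha()
def pvPredSingle (s : String) : Bool :=
  PySem.Str.len s == 1 && pyStrIslower s && PySem.Str.strIsalpha s

-- s.startswith('p') and s[1:].isdigit()
def pvPredNumbered (s : String) : Bool :=
  PySem.Str.startswith s "p" && PySem.Str.strIsdigit (PySem.Str.slice s (some 1) none)

-- len(s) == 2 and s.islower() and s.isalpha()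
def pvPredDouble (s : String) : Bool :=
  PySem.Str.len s == 2 && pyStrIslower s && PySem.Str.strIsalpha s

def detect_naming_pattern_py (phrase_symbols : List String) : String :=
  if phrase_symbols = [] then "empty"
  else if phrase_symbols.all pvPredSingle then "single_letters"
  else if phrase_symbols.all pvPredNumbered then "numbered"
  else if phrase_symbols.all pvPredDouble then "double_letters"
  else "custom"

-- ===== PORT B =====
-- _matches(pattern, s): dispatch on the candidate pattern's name
def pvMatches (pattern : String) (s : String) : Bool :=
  if pattern = "single_letters" then
    PySem.Str.len s == 1 && pyStrIslower s && PySem.Str.strIsalpha s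
  else if pattern = "numbered" then
    PySem.Str.startswith s "p" && PySem.Str.strIsdigit (PySem.Str.slice s (some 1) none)
  else
    PySem.Str.len s == 2 && pyStrIslower s && PySem.Str.strIsalpha s

-- the candidate-narrowing loop: filter survivors per symbol, early 'custom' when none remain
def pvNarrow : List String → List String → String
  | cs, [] => cs.headD "custom"
  | cs, s :: rest =>
      let cs' := cs.filter (fun p => pvMatches p s)
      if cs' = [] then "custom" else pvNarrow cs' rest

def detect_naming_pattern_py_alt (phrase_symbols : List String) : String :=
  if phrase_symbols = [] then "empty"
  else pvNarrow ["single_letters", "numbered", "double_letters"] phrase_symbols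

-- ===== PRECONDITION & SPEC =====
def Spec_detect_naming_pattern_py (phrase_symbols : List String) (out : String) : Prop := out = detect_naming_pattern_py_alt phrase_symbols
instance (phrase_symbols : List String) (out : String) : Decidable (Spec_detect_naming_pattern_py phrase_symbols out) := by unfold Spec_detect_naming_pattern_py; infer_instance

-- ===== CLAIM (what is proved, stated in full; the proofs are below) =====
def Claim_equal_detect_naming_pattern_py : Prop := ∀ (phrase_symbols : List String), Dom_detect_naming_pattern_py phrase_symbols → Spec_detect_naming_pattern_py phrase_symbols (detect_naming_pattern_py phrase_symbols)

-- ===== LEMMAS AND PROOFS =====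
-- The candidate loop computes the first candidate (in priority order) matched by every symbol.
theorem pvNarrow_eq (xs cs : List String) :
    pvNarrow cs xs = (cs.filter (fun p => xs.all (fun s => pvMatches p s))).headD "custom" := by
  induction xs generalizing cs with
  | nil => simp [pvNarrow]
  | cons s rest ih =>
      simp only [pvNarrow, List.all_cons]
      split
      next h =>
        have : cs.filter (fun p => pvMatches p s && rest.all (fun t => pvMatches p t))
            = [] := by
          apply List.eq_nil_of_subset_nil
          rw [← h]
          intro p hp
          simp only [List.mem_filter] at hp ⊢
          exact ⟨hp.1, by simpa using (Bool.and_elim_left hp.2)⟩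
        simp [this]
      next h =>
        rw [ih, List.filter_filter]
        congr 1
        apply List.filter_congr
        intro p _
        rw [Bool.and_comm]

-- ===== VERDICT (by name: the statement is the Claim_ definition above) =====
theorem detect_naming_pattern_py_spec : Claim_equal_detect_naming_pattern_py := by
  intro ps _
  unfold Spec_detect_naming_pattern_py detect_naming_pattern_py detect_naming_pattern_py_alt
  rcases eq_or_ne ps [] with h | h
  · simp [h]
  · simp only [h, if_false, pvNarrow_eq]
    have m1 : (fun s => pvMatches "single_letters" s) = pvPredSingle := by
      funext s; simp [pvMatches, pvPredSingle]
    have m2 : (fun s => pvMatches "numbered" s) = pvPredNumbered := by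
      funext s; simp only [pvMatches, pvPredNumbered]
      rw [if_neg (by decide)]; simp
    have m3 : (fun s => pvMatches "double_letters" s) = pvPredDouble := by
      funext s; simp only [pvMatches, pvPredDouble]
      rw [if_neg (by decide)]; rw [if_neg (by decide)]
    cases h1 : ps.all pvPredSingle <;>
      cases h2 : ps.all pvPredNumbered <;>
        cases h3 : ps.all pvPredDouble <;>
          simp [List.filter, m1, m2, m3, h1, h2, h3]
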